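-- pv_equiv track=rewrite | github.com/7marcosfelipe-gif/Kanvas | organize-dag-groups.py | compute_group_bounds
-- ===== SOURCE A (Python) =====
-- from collections import defaultdict
--
-- def compute_group_bounds(positions, membership, pad_x=60, pad_top=40, pad_bottom=40):
--     """Compute bounding box for each group from its members' final positions.
--
--     Each group wraps tightly around its own cards with padding.
--     Returns {group_id: (x, y, width, height)}.
--     """
--     group_members = defaultdict(list)
--     for tid, gid in membership.items():
--         if tid in positions:
--             group_members[gid].append(tid)
--
--     bounds = {}
--     for gid, members in group_members.items():
--         min_x = min(positions[tid][0] for tid in members)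
--         min_y = min(positions[tid][1] for tid in members)
--         max_x = max(positions[tid][0] + positions[tid][2] for tid in members)
--         max_y = max(positions[tid][1] + positions[tid][3] for tid in members)
--         bounds[gid] = (
--             min_x - pad_x, min_y - pad_top,
--             (max_x - min_x) + 2 * pad_x,
--             (max_y - min_y) + pad_top + pad_bottom,
--         )
--     return bounds
-- ===== SOURCE B (Python) =====
-- def compute_group_bounds(positions, membership, pad_x=60, pad_top=40, pad_bottom=40):
--     """Single pass over membership with running min/max accumulators per group;
--     no per-group member lists are ever built."""
--     acc = {}
--     for tid, gid in membership.items():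
--         p = positions.get(tid)
--         if p is None:
--             continue
--         x, y, w, h = p
--         cur = acc.get(gid)
--         if cur is None:
--             acc[gid] = (x, y, x + w, y + h)
--         else:
--             a, b, c, d = cur
--             acc[gid] = (min(a, x), min(b, y), max(c, x + w), max(d, y + h))
--     return {
--         gid: (a - pad_x, b - pad_top, (c - a) + 2 * pad_x, (d - b) + pad_top + pad_bottom)
--         for gid, (a, b, c, d) in acc.items()
--     }
-- ===== Notes on version B (the rewrite author's own statement) =====
-- stated objective: alternative
-- what changed: B replaces A's two-phase grouping (build per-group member lists, then scan each list four times with min/max generators) by one pass over membership that maintains running (min_x, min_y, max_x, max_y) accumulators per group in a dict, emitting padded bounds from the accumulators; no member lists exist.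
import Mathlib
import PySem

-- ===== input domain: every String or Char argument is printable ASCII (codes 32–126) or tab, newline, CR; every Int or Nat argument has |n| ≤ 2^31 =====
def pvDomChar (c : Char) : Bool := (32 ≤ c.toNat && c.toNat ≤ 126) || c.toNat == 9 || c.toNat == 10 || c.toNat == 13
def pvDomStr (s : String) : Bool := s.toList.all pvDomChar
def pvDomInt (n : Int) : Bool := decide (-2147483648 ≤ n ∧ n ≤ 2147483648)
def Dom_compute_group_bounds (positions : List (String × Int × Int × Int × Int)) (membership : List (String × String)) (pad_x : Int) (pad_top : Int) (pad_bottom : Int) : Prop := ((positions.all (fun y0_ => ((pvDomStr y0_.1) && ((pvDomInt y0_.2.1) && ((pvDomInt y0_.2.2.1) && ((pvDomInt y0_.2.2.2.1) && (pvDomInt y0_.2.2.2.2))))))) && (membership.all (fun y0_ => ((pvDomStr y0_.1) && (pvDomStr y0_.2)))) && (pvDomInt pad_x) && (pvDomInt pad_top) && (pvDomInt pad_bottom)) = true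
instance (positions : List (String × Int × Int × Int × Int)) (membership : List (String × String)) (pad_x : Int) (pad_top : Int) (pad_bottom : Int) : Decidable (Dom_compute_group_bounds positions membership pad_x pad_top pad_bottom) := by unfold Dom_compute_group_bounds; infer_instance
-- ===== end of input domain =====

-- B replaces A's two-phase grouping (member lists, then four min/max scans per group) by a
-- single pass maintaining running extrema per group (objective: alternative decomposition).

-- ===== PORT A =====
-- positions is a Python dict: association list, lookup = first match (List.lookup).
def compute_group_bounds (positions : List (String × Int × Int × Int × Int)) (membership : List (String × String)) (pad_x : Int) (pad_top : Int) (pad_bottom : Int) : List (String × Int × Int × Int × Int) :=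
  -- group_members = defaultdict(list); for tid, gid in membership.items(): if tid in positions: group_members[gid].append(tid)
  let group_members : PySem.Dict String (List String) :=
    membership.foldl (fun d p =>
      if (List.lookup p.1 positions).isSome then d.modify p.2 [] (fun l => l ++ [p.1]) else d)
      PySem.Dict.empty
  -- positions[tid]; the default is unreachable: every member was filtered by 'tid in positions'
  let posv : String → Int × Int × Int × Int := fun tid => (List.lookup tid positions).getD (0, 0, 0, 0)
  let bounds : PySem.Dict String (Int × Int × Int × Int) :=
    group_members.items.foldl (fun b gp =>
      let members := gp.2
      let min_x := (PySem.List.min? (members.map (fun tid => (posv tid).1)) (fun v => v)).getD 0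
      let min_y := (PySem.List.min? (members.map (fun tid => (posv tid).2.1)) (fun v => v)).getD 0
      let max_x := (PySem.List.max? (members.map (fun tid => (posv tid).1 + (posv tid).2.2.1)) (fun v => v)).getD 0
      let max_y := (PySem.List.max? (members.map (fun tid => (posv tid).2.1 + (posv tid).2.2.2)) (fun v => v)).getD 0
      b.insert gp.1 (min_x - pad_x, min_y - pad_top, (max_x - min_x) + 2 * pad_x, (max_y - min_y) + pad_top + pad_bottom))
      PySem.Dict.empty
  bounds.items

-- ===== PORT B =====
def compute_group_bounds_alt (positions : List (String × Int × Int × Int × Int)) (membership : List (String × String)) (pad_x : Int) (pad_top : Int) (pad_bottom : Int) : List (String × Int × Int × Int × Int) :=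
  let acc : PySem.Dict String (Int × Int × Int × Int) :=
    membership.foldl (fun d p =>
      match List.lookup p.1 positions with
      | none => d
      | some (x, y, w, h) =>
        match d.get? p.2 with
        | none => d.insert p.2 (x, y, x + w, y + h)
        | some (a, b, c, e) => d.insert p.2 (min a x, min b y, max c (x + w), max e (y + h)))
      PySem.Dict.empty
  acc.items.map (fun q =>
    (q.1, q.2.1 - pad_x, q.2.2.1 - pad_top, (q.2.2.2.1 - q.2.1) + 2 * pad_x, (q.2.2.2.2 - q.2.2.1) + pad_top + pad_bottom))

-- ===== PRECONDITION & SPEC =====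
def Spec_compute_group_bounds (positions : List (String × Int × Int × Int × Int)) (membership : List (String × String)) (pad_x : Int) (pad_top : Int) (pad_bottom : Int) (out : List (String × Int × Int × Int × Int)) : Prop := out = compute_group_bounds_alt positions membership pad_x pad_top pad_bottom
instance (positions : List (String × Int × Int × Int × Int)) (membership : List (String × String)) (pad_x : Int) (pad_top : Int) (pad_bottom : Int) (out : List (String × Int × Int × Int × Int)) : Decidable (Spec_compute_group_bounds positions membership pad_x pad_top pad_bottom out) := by unfold Spec_compute_group_bounds; infer_instance

-- ===== CLAIM (what is proved, stated in full; the proofs are below) =====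
def Claim_equal_compute_group_bounds : Prop := ∀ (positions : List (String × Int × Int × Int × Int)) (membership : List (String × String)) (pad_x : Int) (pad_top : Int) (pad_bottom : Int), Dom_compute_group_bounds positions membership pad_x pad_top pad_bottom → Spec_compute_group_bounds positions membership pad_x pad_top pad_bottom (compute_group_bounds positions membership pad_x pad_top pad_bottom)

-- ===== LEMMAS AND PROOFS =====

-- min(xs) / max(xs) as A computes them
def pvMn (l : List Int) : Int := (PySem.List.min? l (fun v => v)).getD 0
def pvMx (l : List Int) : Int := (PySem.List.max? l (fun v => v)).getD 0

def pvPosv (positions : List (String × Int × Int × Int × Int)) (tid : String) : Int × Int × Int × Int :=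
  (List.lookup tid positions).getD (0, 0, 0, 0)

-- the four extrema of a member list, as A derives them
def pvRaw (positions : List (String × Int × Int × Int × Int)) (mem : List String) : Int × Int × Int × Int :=
  (pvMn (mem.map (fun tid => (pvPosv positions tid).1)),
   pvMn (mem.map (fun tid => (pvPosv positions tid).2.1)),
   pvMx (mem.map (fun tid => (pvPosv positions tid).1 + (pvPosv positions tid).2.2.1)),
   pvMx (mem.map (fun tid => (pvPosv positions tid).2.1 + (pvPosv positions tid).2.2.2)))

-- invariant linking A's member-list dict to B's extrema dict
def pvInv (positions : List (String × Int × Int × Int × Int))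
    (gm : PySem.Dict String (List String)) (acc : PySem.Dict String (Int × Int × Int × Int)) : Prop :=
  gm.keys = acc.keys ∧ gm.keys.Nodup ∧
  ∀ g ∈ gm.keys, gm.getD g [] ≠ [] ∧ acc.getD g (0, 0, 0, 0) = pvRaw positions (gm.getD g [])

theorem pvMn_append (l : List Int) (v : Int) (h : l ≠ []) : pvMn (l ++ [v]) = min (pvMn l) v := by
  cases l with
  | nil => exact absurd rfl h
  | cons a t =>
    simp [pvMn, PySem.List.min?_id_cons, List.foldl_append]

theorem pvMx_append (l : List Int) (v : Int) (h : l ≠ []) : pvMx (l ++ [v]) = max (pvMx l) v := by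
  cases l with
  | nil => exact absurd rfl h
  | cons a t =>
    simp [pvMx, PySem.List.max?_id_cons, List.foldl_append]

theorem pvRaw_append (positions : List (String × Int × Int × Int × Int)) (mem : List String)
    (tid : String) (x y w h : Int) (hm : mem ≠ [])
    (hl : List.lookup tid positions = some (x, y, w, h)) :
    pvRaw positions (mem ++ [tid]) =
      (min (pvRaw positions mem).1 x, min (pvRaw positions mem).2.1 y,
       max (pvRaw positions mem).2.2.1 (x + w), max (pvRaw positions mem).2.2.2 (y + h)) := by
  have hpv : pvPosv positions tid = (x, y, w, h) := by simp [pvPosv, hl]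
  have hmm : ∀ f : String → Int, mem.map f ≠ [] := by
    intro f hf; exact hm (List.map_eq_nil_iff.mp hf)
  simp only [pvRaw, List.map_append, List.map_cons, List.map_nil, hpv]
  rw [pvMn_append _ _ (hmm _), pvMn_append _ _ (hmm _), pvMx_append _ _ (hmm _), pvMx_append _ _ (hmm _)]

theorem pvRaw_single (positions : List (String × Int × Int × Int × Int)) (tid : String)
    (x y w h : Int) (hl : List.lookup tid positions = some (x, y, w, h)) :
    pvRaw positions [tid] = (x, y, x + w, y + h) := by
  have hpv : pvPosv positions tid = (x, y, w, h) := by simp [pvPosv, hl]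
  simp [pvRaw, pvMn, pvMx, PySem.List.min?_id_cons, PySem.List.max?_id_cons, hpv]

-- one membership step preserves the invariant
theorem pvInv_step (positions : List (String × Int × Int × Int × Int))
    (gm : PySem.Dict String (List String)) (acc : PySem.Dict String (Int × Int × Int × Int))
    (p : String × String) (hI : pvInv positions gm acc) :
    pvInv positions
      (if (List.lookup p.1 positions).isSome then gm.modify p.2 [] (fun l => l ++ [p.1]) else gm)
      (match List.lookup p.1 positions with
       | none => acc
       | some (x, y, w, h) =>
         match acc.get? p.2 with
         | none => acc.insert p.2 (x, y, x + w, y + h)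
         | some (a, b, c, e) => acc.insert p.2 (min a x, min b y, max c (x + w), max e (y + h))) := by
  obtain ⟨hkeys, hnd, hval⟩ := hI
  cases hlk : List.lookup p.1 positions with
  | none => simpa [hlk] using ⟨hkeys, hnd, hval⟩
  | some v =>
    obtain ⟨x, y, w, h⟩ := v
    simp only [Option.isSome_some, if_true]
    cases hq : acc.get? p.2 with
    | none =>
      -- fresh group
      have hnm : p.2 ∉ acc.keys := (PySem.Dict.get?_eq_none_iff_not_mem_keys acc p.2).mp hq
      have hnmg : p.2 ∉ gm.keys := hkeys ▸ hnm
      have hcg : gm.contains p.2 = false := by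
        by_contra hc
        exact hnmg ((PySem.Dict.contains_iff_mem_keys gm p.2).mp (by simpa using hc))
      have hca : acc.contains p.2 = false := by
        by_contra hc
        exact hnm ((PySem.Dict.contains_iff_mem_keys acc p.2).mp (by simpa using hc))
      have hg0 : gm.getD p.2 [] = [] := PySem.Dict.getD_of_not_contains gm [] hcg
      refine ⟨?_, ?_, ?_⟩
      · rw [PySem.Dict.keys_modify, PySem.Dict.keys_insert_of_not_contains gm _ hcg,
          PySem.Dict.keys_insert_of_not_contains acc _ hca, hkeys]
      · rw [PySem.Dict.keys_modify, PySem.Dict.keys_insert_of_not_contains gm _ hcg]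
        exact List.Nodup.append hnd (List.nodup_singleton _) (by simpa using hnmg)
      · intro g hg
        rw [PySem.Dict.keys_modify, PySem.Dict.keys_insert_of_not_contains gm _ hcg] at hg
        by_cases hgp : g = p.2
        · rw [PySem.Dict.getD_modify gm p.2 g, if_pos hgp, hg0,
            PySem.Dict.getD_insert acc p.2 g, if_pos hgp]
          constructor
          · simp
          · rw [List.nil_append, pvRaw_single positions p.1 x y w h hlk]
        · have hg' : g ∈ gm.keys := by
            rcases List.mem_append.mp hg with h1 | h1
            · exact h1
            · exact absurd (List.mem_singleton.mp h1) hgp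
          rw [PySem.Dict.getD_modify gm p.2 g, if_neg hgp,
            PySem.Dict.getD_insert acc p.2 g, if_neg hgp]
          exact hval g hg'
    | some v0 =>
      obtain ⟨a, b, c, e⟩ := v0
      have hma : p.2 ∈ acc.keys := by
        by_contra hn
        rw [(PySem.Dict.get?_eq_none_iff_not_mem_keys acc p.2).mpr hn] at hq
        cases hq
      have hmg : p.2 ∈ gm.keys := hkeys ▸ hma
      have hcg : gm.contains p.2 = true := (PySem.Dict.contains_iff_mem_keys gm p.2).mpr hmg
      have hca : acc.contains p.2 = true := (PySem.Dict.contains_iff_mem_keys acc p.2).mpr hma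
      obtain ⟨hne, hraw⟩ := hval p.2 hmg
      have hacc : acc.getD p.2 (0, 0, 0, 0) = (a, b, c, e) := by
        rw [PySem.Dict.getD_eq_get?_getD, hq]; rfl
      refine ⟨?_, ?_, ?_⟩
      · rw [PySem.Dict.keys_modify, PySem.Dict.keys_insert_of_contains gm _ hcg,
          PySem.Dict.keys_insert_of_contains acc _ hca, hkeys]
      · rw [PySem.Dict.keys_modify, PySem.Dict.keys_insert_of_contains gm _ hcg]; exact hnd
      · intro g hg
        rw [PySem.Dict.keys_modify, PySem.Dict.keys_insert_of_contains gm _ hcg] at hg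
        by_cases hgp : g = p.2
        · rw [PySem.Dict.getD_modify gm p.2 g, if_pos hgp,
            PySem.Dict.getD_insert acc p.2 g, if_pos hgp]
          refine ⟨by simp, ?_⟩
          rw [pvRaw_append positions _ p.1 x y w h hne hlk, ← hraw, hacc]
        · rw [PySem.Dict.getD_modify gm p.2 g, if_neg hgp,
            PySem.Dict.getD_insert acc p.2 g, if_neg hgp]
          exact hval g hg
  -- (end step lemma)

-- A's emission of a dict gm equals B's emission of a matching acc
theorem pvFinish (positions : List (String × Int × Int × Int × Int)) (pad_x pad_top pad_bottom : Int)
    (gm : PySem.Dict String (List String)) (acc : PySem.Dict String (Int × Int × Int × Int))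
    (hI : pvInv positions gm acc) :
    (gm.items.foldl (fun b gp =>
      let members := gp.2
      let min_x := (PySem.List.min? (members.map (fun tid => (pvPosv positions tid).1)) (fun v => v)).getD 0
      let min_y := (PySem.List.min? (members.map (fun tid => (pvPosv positions tid).2.1)) (fun v => v)).getD 0
      let max_x := (PySem.List.max? (members.map (fun tid => (pvPosv positions tid).1 + (pvPosv positions tid).2.2.1)) (fun v => v)).getD 0
      let max_y := (PySem.List.max? (members.map (fun tid => (pvPosv positions tid).2.1 + (pvPosv positions tid).2.2.2)) (fun v => v)).getD 0
      b.insert gp.1 (min_x - pad_x, min_y - pad_top, (max_x - min_x) + 2 * pad_x, (max_y - min_y) + pad_top + pad_bottom))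
      PySem.Dict.empty).items =
    acc.items.map (fun q =>
      (q.1, q.2.1 - pad_x, q.2.2.1 - pad_top, (q.2.2.2.1 - q.2.1) + 2 * pad_x, (q.2.2.2.2 - q.2.2.1) + pad_top + pad_bottom)) := by
  obtain ⟨hkeys, hnd, hval⟩ := hI
  have hnda : acc.keys.Nodup := hkeys ▸ hnd
  have hkm : gm.items.map Prod.fst = gm.keys := rfl
  rw [PySem.Dict.items_foldl_insert_fresh gm.items Prod.fst _ PySem.Dict.empty
        (fun a _ => PySem.Dict.contains_empty _) (hkm ▸ hnd)]
  rw [PySem.Dict.items_eq_map_keys gm hnd [], PySem.Dict.items_eq_map_keys acc hnda (0, 0, 0, 0)]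
  rw [← hkeys]
  have hemp : (PySem.Dict.empty : PySem.Dict String (Int × Int × Int × Int)).items = [] := rfl
  rw [hemp, List.nil_append, List.map_map, List.map_map]
  apply List.map_congr_left
  intro g hg
  obtain ⟨_, hraw⟩ := hval g hg
  simp only [Function.comp, hraw, pvRaw, pvMn, pvMx]
  -- (end finish lemma)

theorem pvMain (positions : List (String × Int × Int × Int × Int))
    (membership : List (String × String))
    (gm : PySem.Dict String (List String)) (acc : PySem.Dict String (Int × Int × Int × Int))
    (hI : pvInv positions gm acc) :
    pvInv positions
      (membership.foldl (fun d p =>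
        if (List.lookup p.1 positions).isSome then d.modify p.2 [] (fun l => l ++ [p.1]) else d) gm)
      (membership.foldl (fun d p =>
        match List.lookup p.1 positions with
        | none => d
        | some (x, y, w, h) =>
          match d.get? p.2 with
          | none => d.insert p.2 (x, y, x + w, y + h)
          | some (a, b, c, e) => d.insert p.2 (min a x, min b y, max c (x + w), max e (y + h))) acc) := by
  induction membership generalizing gm acc with
  | nil => exact hI
  | cons p t ih =>
    simp only [List.foldl_cons]
    exact ih _ _ (pvInv_step positions gm acc p hI)

theorem pvInv_empty (positions : List (String × Int × Int × Int × Int)) :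
    pvInv positions PySem.Dict.empty PySem.Dict.empty := by
  refine ⟨rfl, ?_, ?_⟩
  · rw [PySem.Dict.keys_empty]; exact List.nodup_nil
  · intro g hg; rw [PySem.Dict.keys_empty] at hg; exact absurd hg (List.not_mem_nil)

-- ===== VERDICT (by name: the statement is the Claim_ definition above) =====
theorem compute_group_bounds_spec : Claim_equal_compute_group_bounds := by
  intro positions membership pad_x pad_top pad_bottom _
  unfold Spec_compute_group_bounds compute_group_bounds compute_group_bounds_alt
  exact pvFinish positions pad_x pad_top pad_bottom _ _
    (pvMain positions membership _ _ (pvInv_empty positions))
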